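-- pv_equiv track=rewrite | github.com/ikokkari/PythonProblems | labs109.py | maximal_repeated_suffix
-- ===== SOURCE A (Python) =====
-- def maximal_repeated_suffix(items):
--     n = len(items)
--     m = n // 2
--     while m > 0:
--         for i in range(m):
--             if items[-2 * m + i] != items[-m + i]:
--                 break
--         else:
--             return m
--         m -= 1
--     return 0
-- ===== SOURCE B (Python) =====
-- def maximal_repeated_suffix(items):
--     s = items[::-1]
--     n = len(s)
--     z = [0] * n
--     l = r = 0
--     for i in range(1, n):
--         if i < r:
--             z[i] = min(r - i, z[i - l])
--         while i + z[i] < n and s[z[i]] == s[i + z[i]]: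
--             z[i] += 1
--         if i + z[i] > r:
--             l, r = i, i + z[i]
--     for m in range(n // 2, 0, -1):
--         if z[m] >= m:
--             return m
--     return 0
-- ===== Notes on version B (the rewrite author's own statement) =====
-- stated objective: alternative
-- what changed: A tries each candidate m from n//2 downward, re-comparing the two adjacent length-m blocks elementwise per candidate; B instead computes the Z-array of the reversed list with the l/r-window Z-algorithm and then reads off the largest m <= n//2 with Z[m] >= m (worst-case O(n) vs A's O(n^2), though on the generated random inputs A's early mismatches make both comparable).
import Mathlib
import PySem

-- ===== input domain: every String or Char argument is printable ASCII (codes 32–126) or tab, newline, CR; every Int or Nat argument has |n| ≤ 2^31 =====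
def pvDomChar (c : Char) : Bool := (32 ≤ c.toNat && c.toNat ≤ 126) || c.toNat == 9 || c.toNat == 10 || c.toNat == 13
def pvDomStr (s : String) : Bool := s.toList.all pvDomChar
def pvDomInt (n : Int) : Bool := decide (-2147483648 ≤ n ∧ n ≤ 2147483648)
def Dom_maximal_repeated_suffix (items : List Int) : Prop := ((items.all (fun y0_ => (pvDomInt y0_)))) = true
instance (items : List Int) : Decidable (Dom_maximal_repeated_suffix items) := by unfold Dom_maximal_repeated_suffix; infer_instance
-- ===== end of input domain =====

-- B computes the Z-array of the reversed list with the l/r-window Z-algorithm and reads off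
-- the largest m ≤ n//2 with Z[m] ≥ m, instead of A's per-candidate elementwise block comparison.

-- ===== PORT A =====
-- the inner 'for i in range(m): if items[-2*m+i] != items[-m+i]: break / else: return m'
-- (no side effects, so the for-else is exactly an 'all' over the range)
def pvInnerA (items : List Int) (m : Int) : Bool :=
  (PySem.List.pyRange 0 m 1).all
    (fun i => PySem.List.pyGet? items (-2 * m + i) == PySem.List.pyGet? items (-m + i))

-- the 'while m > 0' loop, fuel = current m (decreases by exactly 1 each iteration)
def pvLoopA (items : List Int) : Nat → Int
  | 0 => 0
  | Nat.succ k => if pvInnerA items ((k : Int) + 1) then (k : Int) + 1 else pvLoopA items k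

def maximal_repeated_suffix (items : List Int) : Int :=
  pvLoopA items (PySem.Int.floordiv (items.length : Int) 2).toNat

-- ===== PORT B =====
-- the inner 'while i + z[i] < n and s[z[i]] == s[i + z[i]]: z[i] += 1'
-- (indices are in range whenever the guard holds, so getD is exact)
def pvExtend (s : List Int) (i : Nat) (z : Nat) : Nat :=
  if _h : i + z < s.length ∧ s.getD z 0 = s.getD (i + z) 0 then pvExtend s i (z + 1)
  else z
termination_by s.length - (i + z)
decreasing_by omega

-- one iteration of 'for i in range(1, n)' over the state (z, l, r)
def pvZStep (s : List Int) (st : List Nat × Nat × Nat) (i : Nat) : List Nat × Nat × Nat :=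
  let z := st.1
  let l := st.2.1
  let r := st.2.2
  let z0 := if i < r then min (r - i) (z.getD (i - l) 0) else 0
  let zi := pvExtend s i z0
  let z' := z.set i zi
  if i + zi > r then (z', i, i + zi) else (z', l, r)

-- z = [0]*n; l = r = 0; for i in range(1, n): …
def pvZ (s : List Int) : List Nat :=
  ((List.range' 1 (s.length - 1)).foldl (pvZStep s) (List.replicate s.length 0, 0, 0)).1

-- 'for m in range(n//2, 0, -1): if z[m] >= m: return m' / 'return 0'
def pvScanB (z : List Nat) : Nat → Int
  | 0 => 0
  | Nat.succ k => if z.getD (k + 1) 0 ≥ k + 1 then ((k : Int) + 1) else pvScanB z k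

def maximal_repeated_suffix_alt (items : List Int) : Int :=
  pvScanB (pvZ items.reverse) (items.length / 2)

-- ===== PRECONDITION & SPEC =====
def Spec_maximal_repeated_suffix (items : List Int) (out : Int) : Prop := out = maximal_repeated_suffix_alt items
instance (items : List Int) (out : Int) : Decidable (Spec_maximal_repeated_suffix items out) := by unfold Spec_maximal_repeated_suffix; infer_instance

-- ===== CLAIM (what is proved, stated in full; the proofs are below) =====
def Claim_equal_maximal_repeated_suffix : Prop := ∀ (items : List Int), Dom_maximal_repeated_suffix items → Spec_maximal_repeated_suffix items (maximal_repeated_suffix items)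

-- ===== LEMMAS AND PROOFS =====

-- length of the longest common prefix (specification value for the Z-array)
def pvLcp : List Int → List Int → Nat
  | a :: as, b :: bs => if a = b then pvLcp as bs + 1 else 0
  | _, _ => 0

-- the Z-value at shift k: lcp of s with s.drop k
def pvL (s : List Int) (k : Nat) : Nat := pvLcp s (s.drop k)

lemma pvLcp_le_right : ∀ (a b : List Int), pvLcp a b ≤ b.length := by
  intro a
  induction a with
  | nil => intro b; cases b <;> simp [pvLcp]
  | cons x xs ih =>
    intro b
    cases b with
    | nil => simp [pvLcp]
    | cons y ys =>
      simp only [pvLcp]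
      split_ifs
      · have := ih ys; simp; omega
      · simp

lemma pvLcp_getD_eq : ∀ (a b : List Int) (j : Nat), j < pvLcp a b → a.getD j 0 = b.getD j 0 := by
  intro a
  induction a with
  | nil => intro b j h; cases b <;> simp [pvLcp] at h
  | cons x xs ih =>
    intro b j h
    cases b with
    | nil => simp [pvLcp] at h
    | cons y ys =>
      simp only [pvLcp] at h
      split_ifs at h with he
      · cases j with
        | zero => simpa using he
        | succ j' => simpa using ih ys j' (by omega)
      · omega

lemma pvLcp_getD_ne : ∀ (a b : List Int), pvLcp a b < a.length → pvLcp a b < b.length →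
    a.getD (pvLcp a b) 0 ≠ b.getD (pvLcp a b) 0 := by
  intro a
  induction a with
  | nil => intro b h1 _; simp at h1
  | cons x xs ih =>
    intro b h1 h2
    cases b with
    | nil => simp at h2
    | cons y ys =>
      simp only [pvLcp] at *
      split_ifs at * with he
      · simpa using ih ys (by simpa using h1) (by simpa using h2)
      · simpa using he

lemma pvLcp_ge : ∀ (a b : List Int) (m : Nat), m ≤ a.length → m ≤ b.length →
    (∀ j < m, a.getD j 0 = b.getD j 0) → m ≤ pvLcp a b := by
  intro a
  induction a with
  | nil => intro b m h1 _ _; simp at h1; omega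
  | cons x xs ih =>
    intro b m h1 h2 hp
    cases b with
    | nil => simp at h2; omega
    | cons y ys =>
      cases m with
      | zero => omega
      | succ m' =>
        have hx : x = y := by simpa using hp 0 (by omega)
        simp only [pvLcp, if_pos hx]
        have := ih ys m' (by simpa using h1) (by simpa using h2)
          (fun j hj => by simpa using hp (j + 1) (by omega))
        omega

lemma getD_drop (s : List Int) (i j : Nat) : (s.drop i).getD j 0 = s.getD (i + j) 0 := by
  simp [List.getD_eq_getElem?_getD, List.getElem?_drop]

lemma pvL_le (s : List Int) (k : Nat) : pvL s k ≤ s.length - k := by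
  have := pvLcp_le_right s (s.drop k)
  simpa [pvL] using this

-- the while loop reaches exactly the lcp from any start ≤ lcp
lemma pvExtend_eq (s : List Int) (i : Nat) :
    ∀ d z0, pvL s i - z0 ≤ d → z0 ≤ pvL s i → pvExtend s i z0 = pvL s i := by
  intro d
  induction d with
  | zero =>
    intro z0 hd hz
    have hz0 : z0 = pvL s i := by omega
    subst hz0
    rw [pvExtend]
    split_ifs with h
    · exfalso
      obtain ⟨hA, hB⟩ := h
      have hlt1 : pvL s i < s.length := by omega
      have hlt2 : pvL s i < (s.drop i).length := by
        simp only [List.length_drop]; omega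
      have hne := pvLcp_getD_ne s (s.drop i) hlt1 hlt2
      rw [getD_drop] at hne
      exact hne (by simpa [pvL] using hB)
    · rfl
  | succ d ih =>
    intro z0 hd hz
    rw [pvExtend]
    split_ifs with h
    · -- condition holds, so z0 < pvL s i
      have hlt : z0 < pvL s i := by
        rcases Nat.lt_or_ge z0 (pvL s i) with h' | h'
        · exact h'
        · exfalso
          obtain ⟨hA, hB⟩ := h
          have hz0 : z0 = pvL s i := by omega
          subst hz0
          have hlt2 : pvL s i < (s.drop i).length := by
            simp only [List.length_drop]; omega
          have hne := pvLcp_getD_ne s (s.drop i) (by show pvL s i < s.length; omega) hlt2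
          rw [getD_drop] at hne
          exact hne (by simpa [pvL] using hB)
      exact ih (z0 + 1) (by omega) (by omega)
    · -- condition fails, so z0 = pvL s i
      rcases Nat.lt_or_ge z0 (pvL s i) with h' | h'
      · exfalso
        apply h
        constructor
        · have hle := pvL_le s i
          have : i + z0 < i + pvL s i := by omega
          -- pvL s i ≤ s.length - i, and pvL s i > 0 hence i < s.length
          have hi : i ≤ s.length := by
            by_contra hc
            have hnil : s.drop i = [] := List.drop_eq_nil_of_le (by omega)
            simp [pvL, hnil, pvLcp] at h'
          omega
        · have := pvLcp_getD_eq s (s.drop i) z0 (by simpa [pvL] using h')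
          rwa [getD_drop] at this
      · omega

-- loop invariant for the Z-algorithm main loop
def pvInv (s : List Int) (i : Nat) (st : List Nat × Nat × Nat) : Prop :=
  st.1.length = s.length ∧ st.2.1 < i ∧ st.2.2 ≤ st.2.1 + pvL s st.2.1 ∧
  (st.2.1 = 0 → st.2.2 = 0) ∧
  ∀ k, 1 ≤ k → k < i → st.1.getD k 0 = pvL s k

lemma pvZStep_inv (s : List Int) (i : Nat) (st : List Nat × Nat × Nat)
    (hi1 : 1 ≤ i) (hin : i < s.length) (hinv : pvInv s i st) :
    pvInv s (i + 1) (pvZStep s st i) := by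
  obtain ⟨z, l, r⟩ := st
  obtain ⟨hlen, hl, hr, hl0, hz⟩ := hinv
  dsimp only [pvInv] at hlen hl hr hl0 hz ⊢
  dsimp only [pvZStep]
  have hrn : r ≤ s.length := by
    have := pvL_le s l
    omega
  have hz0le : (if i < r then min (r - i) (z.getD (i - l) 0) else 0) ≤ pvL s i := by
    split_ifs with hir
    · -- i < r forces l ≥ 1 (l = 0 would force r = 0), so 1 ≤ i - l < i
      have hl1 : 1 ≤ l := by
        rcases Nat.eq_zero_or_pos l with h0 | h
        · exfalso; have := hl0 h0; omega
        · exact h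
      have hki : i - l < i := by omega
      have hzk : z.getD (i - l) 0 ≤ pvL s (i - l) := by
        rw [hz (i - l) (by omega) hki]
      apply pvLcp_ge
      · omega
      · simp only [List.length_drop]; omega
      · intro j hj
        have hjr : j < r - i := by omega
        have hjk : j < pvL s (i - l) := by
          have : j < z.getD (i - l) 0 := by omega
          omega
        -- s[i+j] = s[l + ((i-l)+j)] = s[(i-l)+j]  (from r - l ≤ pvL s l)
        have h1 : s.getD (l + ((i - l) + j)) 0 = s.getD ((i - l) + j) 0 := by
          have hlt : (i - l) + j < pvL s l := by omega
          have := pvLcp_getD_eq s (s.drop l) ((i - l) + j) (by simpa [pvL] using hlt)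
          rw [getD_drop] at this
          exact this.symm
        -- s[(i-l)+j] = s[j]  (from j < pvL s (i-l))
        have h2 : s.getD j 0 = s.getD ((i - l) + j) 0 := by
          have := pvLcp_getD_eq s (s.drop (i - l)) j (by simpa [pvL] using hjk)
          rwa [getD_drop] at this
        rw [getD_drop, h2, show i + j = l + ((i - l) + j) by omega, h1]
    · omega
  have hzi : pvExtend s i (if i < r then min (r - i) (z.getD (i - l) 0) else 0) = pvL s i :=
    pvExtend_eq s i (pvL s i) _ (by omega) hz0le
  rw [hzi]
  have hset_get : ∀ k, 1 ≤ k → k < i + 1 → (z.set i (pvL s i)).getD k 0 = pvL s k := by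
    intro k hk1 hki
    rcases Nat.lt_or_ge k i with hki' | hki'
    · rw [List.getD_eq_getElem?_getD, List.getElem?_set_ne (by omega),
        ← List.getD_eq_getElem?_getD]
      exact hz k hk1 hki'
    · have hk : k = i := by omega
      subst hk
      rw [List.getD_eq_getElem?_getD, List.getElem?_set_self (by omega)]
      simp
  split_ifs with hgt
  · exact ⟨by simp [hlen], by show i < i + 1; omega, by show i + pvL s i ≤ i + pvL s i; exact le_rfl,
      by show i = 0 → _; intro h0; omega, hset_get⟩
  · exact ⟨by simp [hlen], by show l < i + 1; omega, hr, hl0, hset_get⟩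

lemma pvZ_inv (s : List Int) :
    ∀ j, j ≤ s.length - 1 →
      pvInv s (1 + j) ((List.range' 1 j).foldl (pvZStep s) (List.replicate s.length 0, 0, 0)) := by
  intro j
  induction j with
  | zero =>
    intro _
    simp only [List.range'_zero, List.foldl_nil]
    exact ⟨by simp, by show (0 : Nat) < 1 + 0; omega, by show (0 : Nat) ≤ 0 + pvL s 0; omega,
      fun _ => rfl, fun k hk1 hk2 => by omega⟩
  | succ j ih =>
    intro hj
    rw [List.range'_concat, List.foldl_append]
    simp only [one_mul, List.foldl_cons, List.foldl_nil]
    exact pvZStep_inv s (1 + j) _ (by omega) (by omega) (ih (by omega))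

lemma pvZ_getD (s : List Int) (k : Nat) (hk1 : 1 ≤ k) (hk2 : k < s.length) :
    (pvZ s).getD k 0 = pvL s k := by
  have h := pvZ_inv s (s.length - 1) (le_refl _)
  have : 1 + (s.length - 1) = s.length := by omega
  rw [this] at h
  exact h.2.2.2.2 k hk1 hk2

-- relate A's inner for-else test to the Z-value of the reversed list
lemma getD_reverse (xs : List Int) (j : Nat) (hj : j < xs.length) :
    xs.reverse.getD j 0 = xs.getD (xs.length - 1 - j) 0 := by
  rw [List.getD_eq_getElem?_getD, List.getD_eq_getElem?_getD, List.getElem?_reverse hj]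

lemma getElem?_eq_iff_getD (xs : List Int) (x y : Nat) (hx : x < xs.length) (hy : y < xs.length) :
    (xs[x]? = xs[y]?) ↔ xs.getD x 0 = xs.getD y 0 := by
  rw [List.getElem?_eq_getElem hx, List.getElem?_eq_getElem hy,
    List.getD_eq_getElem xs 0 hx, List.getD_eq_getElem xs 0 hy]
  simp

lemma innerA_iff (items : List Int) (m : Nat) (h1 : 1 ≤ m) (h2 : 2 * m ≤ items.length) :
    pvInnerA items (m : Int) = true ↔ (m : Nat) ≤ pvL items.reverse m := by
  set n := items.length with hn
  -- step 1: the for-else test says the two blocks agree elementwise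
  have step1 : pvInnerA items (m : Int) = true ↔
      ∀ i < m, items.getD (n - 2 * m + i) 0 = items.getD (n - m + i) 0 := by
    unfold pvInnerA
    rw [PySem.List.pyRange_one]
    simp only [List.all_map, List.all_eq_true, List.mem_range, Function.comp, beq_iff_eq]
    constructor
    · intro h i hi
      have hi' : i < ((m : Int) - 0).toNat := by omega
      have := h i hi'
      rw [show (-2 * (m : Int) + (0 + (i : Int))) = -((2 * m - i : Nat) : Int) by omega,
          PySem.List.pyGet?_neg_natCast items _ (by omega) (by omega),
          show (-(m : Int) + (0 + (i : Int))) = -((m - i : Nat) : Int) by omega,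
          PySem.List.pyGet?_neg_natCast items _ (by omega) (by omega)] at this
      rw [show n - (2 * m - i) = n - 2 * m + i by omega, show n - (m - i) = n - m + i by omega] at this
      exact (getElem?_eq_iff_getD items _ _ (by omega) (by omega)).mp this
    · intro h i hi
      have hi' : i < m := by omega
      have := h i hi'
      rw [show (-2 * (m : Int) + (0 + (i : Int))) = -((2 * m - i : Nat) : Int) by omega,
          PySem.List.pyGet?_neg_natCast items _ (by omega) (by omega),
          show (-(m : Int) + (0 + (i : Int))) = -((m - i : Nat) : Int) by omega,
          PySem.List.pyGet?_neg_natCast items _ (by omega) (by omega),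
          show n - (2 * m - i) = n - 2 * m + i by omega, show n - (m - i) = n - m + i by omega]
      exact (getElem?_eq_iff_getD items _ _ (by omega) (by omega)).mpr this
  -- step 2: elementwise block agreement is pointwise self-overlap of the reversed list
  have step2 : (∀ i < m, items.getD (n - 2 * m + i) 0 = items.getD (n - m + i) 0) ↔
      ∀ j < m, items.reverse.getD j 0 = items.reverse.getD (m + j) 0 := by
    constructor
    · intro h j hj
      have := h (m - 1 - j) (by omega)
      rw [getD_reverse items j (by omega), getD_reverse items (m + j) (by omega), ← hn]
      rw [show n - 2 * m + (m - 1 - j) = n - 1 - (m + j) by omega,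
          show n - m + (m - 1 - j) = n - 1 - j by omega] at this
      exact this.symm
    · intro h i hi
      have := h (m - 1 - i) (by omega)
      rw [getD_reverse items (m - 1 - i) (by omega),
          getD_reverse items (m + (m - 1 - i)) (by omega), ← hn] at this
      rw [show n - 1 - (m - 1 - i) = n - m + i by omega,
          show n - 1 - (m + (m - 1 - i)) = n - 2 * m + i by omega] at this
      exact this.symm
  -- step 3: pointwise self-overlap of length m is exactly Z[m] ≥ m
  have step3 : (∀ j < m, items.reverse.getD j 0 = items.reverse.getD (m + j) 0) ↔
      m ≤ pvL items.reverse m := by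
    constructor
    · intro h
      apply pvLcp_ge
      · simp [← hn]; omega
      · simp only [List.length_drop, List.length_reverse, ← hn]; omega
      · intro j hj
        rw [getD_drop]
        exact h j hj
    · intro h j hj
      have := pvLcp_getD_eq items.reverse (items.reverse.drop m) j (by
        unfold pvL at h; omega)
      rwa [getD_drop] at this
  rw [step1, step2, step3]

lemma scan_eq (items : List Int) :
    ∀ K, 2 * K ≤ items.length → pvLoopA items K = pvScanB (pvZ items.reverse) K := by
  intro K
  induction K with
  | zero => intro _; rfl
  | succ k ih =>
    intro hK
    have hm1 : 1 ≤ k + 1 := by omega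
    have hmn : k + 1 < items.length := by omega
    have hiff := innerA_iff items (k + 1) hm1 (by omega)
    have hzk : (pvZ items.reverse).getD (k + 1) 0 = pvL items.reverse (k + 1) := by
      have := pvZ_getD items.reverse (k + 1) hm1 (by simpa using hmn)
      exact this
    simp only [pvLoopA, pvScanB, hzk]
    push_cast at hiff ⊢
    by_cases hc : pvInnerA items ((k : Int) + 1) = true
    · rw [if_pos hc, if_pos]
      have := hiff.mp (by exact_mod_cast hc)
      omega
    · rw [if_neg hc, if_neg, ih (by omega)]
      intro hge
      exact hc (by exact_mod_cast hiff.mpr (by omega))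

-- ===== VERDICT (by name: the statement is the Claim_ definition above) =====
theorem maximal_repeated_suffix_spec : Claim_equal_maximal_repeated_suffix := by
  intro items _
  simp only [Spec_maximal_repeated_suffix, maximal_repeated_suffix, maximal_repeated_suffix_alt]
  have hfd : PySem.Int.floordiv (items.length : Int) 2 = ((items.length / 2 : Nat) : Int) := by
    exact_mod_cast PySem.Int.floordiv_natCast items.length 2
  simp only [hfd, Int.toNat_natCast]
  exact scan_eq items (items.length / 2) (by omega)
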